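-- pv_equiv track=rewrite | github.com/HackXIt/REIL-hex-game | src/reil_hex_game/agents/rule_based_v1_agent.py | is_cut_point
-- ===== SOURCE A (Python) =====
-- HEX_NEIGHBORS = [(-1, 0), (-1, 1), (0, -1), (0, 1), (1, -1), (1, 0)]
--
-- def get_neighbors(i, j, size):
--     return [
--         (i+di, j+dj)
--         for di, dj in HEX_NEIGHBORS
--         if 0 <= i+di < size and 0 <= j+dj < size
--     ]
--
-- def is_cut_point(board, player):
--     # Naive version: checks if all stones are connected (can be improved)
--     size = len(board)
--     visited = set()
--     starts = [(i, j) for i in range(size) for j in range(size) if board[i][j] == player]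
--     if not starts:
--         return False
--     def dfs(i, j):
--         stack = [(i, j)]
--         while stack:
--             ci, cj = stack.pop()
--             visited.add((ci, cj))
--             for ni, nj in get_neighbors(ci, cj, size):
--                 if board[ni][nj] == player and (ni, nj) not in visited:
--                     stack.append((ni, nj))
--     dfs(starts[0][0], starts[0][1])
--     return len(visited) < len(starts)
-- ===== SOURCE B (Python) =====
-- HEX_NEIGHBORS = [(-1, 0), (-1, 1), (0, -1), (0, 1), (1, -1), (1, 0)]
--
-- def get_neighbors(i, j, size):
--     return [
--         (i+di, j+dj)
--         for di, dj in HEX_NEIGHBORS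
--         if 0 <= i+di < size and 0 <= j+dj < size
--     ]
--
-- def is_cut_point(board, player):
--     # Label propagation: saturate reachability from the first stone by full
--     # passes over the stone list; len(stones) passes always reach the fixpoint.
--     size = len(board)
--     stones = [(i, j) for i in range(size) for j in range(size) if board[i][j] == player]
--     if not stones:
--         return False
--     reach = {stones[0]}
--     for _ in range(len(stones)):
--         for s in stones:
--             if s not in reach and any(nb in reach for nb in get_neighbors(s[0], s[1], size)):
--                 reach.add(s)
--     return len(reach) < len(stones)
-- ===== Notes on version B (the rewrite author's own statement) =====
-- stated objective: alternative
-- what changed: Replaced the stack-based DFS over the player's stones by round-based label propagation: repeated full passes over the stone list grow the reachable set until saturation (len(stones) passes suffice), with no stack maintained.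
import Mathlib
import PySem

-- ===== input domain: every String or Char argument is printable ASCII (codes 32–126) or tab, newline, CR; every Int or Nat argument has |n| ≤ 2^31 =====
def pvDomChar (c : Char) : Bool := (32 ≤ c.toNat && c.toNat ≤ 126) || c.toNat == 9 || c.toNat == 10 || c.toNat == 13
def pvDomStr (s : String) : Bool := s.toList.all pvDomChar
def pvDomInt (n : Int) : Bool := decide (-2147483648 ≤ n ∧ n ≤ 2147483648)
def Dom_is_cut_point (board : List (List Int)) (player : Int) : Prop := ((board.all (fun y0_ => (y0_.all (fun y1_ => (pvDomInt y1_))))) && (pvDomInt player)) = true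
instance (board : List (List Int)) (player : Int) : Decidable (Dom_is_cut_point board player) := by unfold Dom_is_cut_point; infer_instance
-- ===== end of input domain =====

-- B replaces the stack-based DFS by round-based label propagation (alternative algorithm, same result).
-- Both Pythons read board[i][j] for all 0 ≤ i,j < len(board); `cellD` is exact under Pre_is_cut_point.

-- ===== PORT A =====
-- shared module helper (identical in Source A and Source B)
def hexNeighbors : List (Int × Int) := [(-1, 0), (-1, 1), (0, -1), (0, 1), (1, -1), (1, 0)]

def get_neighbors (i j size : Int) : List (Int × Int) :=
  (hexNeighbors.filter (fun d =>
      decide (0 ≤ i + d.1) && decide (i + d.1 < size) &&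
      decide (0 ≤ j + d.2) && decide (j + d.2 < size))).map
    (fun d => (i + d.1, j + d.2))

-- board[i][j]; exact under Pre_is_cut_point (every index used is in range there)
def cellD (board : List (List Int)) (i j : Int) : Int :=
  PySem.List.pyGetD (PySem.List.pyGetD board i []) j 0

-- the comprehension [(i, j) for i in range(size) for j in range(size) if board[i][j] == player],
-- identical in both Source A and Source B
def stonesOf (board : List (List Int)) (player : Int) : List (Int × Int) :=
  (PySem.List.pyRange 0 board.length 1).flatMap (fun i =>
    ((PySem.List.pyRange 0 board.length 1).filter (fun j => cellD board i j == player)).map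
      (fun j => (i, j)))

-- the while-loop of dfs: pop from the end, mark visited, push unvisited player neighbors.
-- fuel only makes the loop total; 7 ^ (len(board)^2) provably suffices (dfsLoop_fuel lemmas below).
def dfsLoop (board : List (List Int)) (player : Int) (size : Int) :
    Nat → PySem.Set (Int × Int) → List (Int × Int) → PySem.Set (Int × Int)
  | 0, visited, _ => visited
  | fuel + 1, visited, stack =>
    match stack.getLast? with
    | none => visited
    | some c =>
      let rest := stack.dropLast
      let visited' := PySem.Set.add visited c
      let pushes := (get_neighbors c.1 c.2 size).filter
        (fun nb => cellD board nb.1 nb.2 == player && !(PySem.Set.contains visited' nb))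
      dfsLoop board player size fuel visited' (rest ++ pushes)

def is_cut_point (board : List (List Int)) (player : Int) : Bool :=
  let size : Int := (board.length : Int)
  let starts := stonesOf board player
  match starts with
  | [] => false
  | s0 :: _ =>
    let visited := dfsLoop board player size (7 ^ (board.length * board.length))
      PySem.Set.empty [s0]
    decide (visited.length < starts.length)

-- ===== PORT B =====
-- one full pass over the stones: add every stone adjacent to the current reach set
def propagate (board : List (List Int)) (player : Int) (size : Int)
    (stones : List (Int × Int)) (reach : PySem.Set (Int × Int)) : PySem.Set (Int × Int) :=
  stones.foldl (fun r s =>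
    if !(PySem.Set.contains r s) &&
        (get_neighbors s.1 s.2 size).any (fun nb => PySem.Set.contains r nb)
    then PySem.Set.add r s else r) reach

def is_cut_point_alt (board : List (List Int)) (player : Int) : Bool :=
  let size : Int := (board.length : Int)
  let stones := stonesOf board player
  match stones with
  | [] => false
  | s0 :: _ =>
    let reach := (List.range stones.length).foldl
      (fun r _ => propagate board player size stones r)
      (PySem.Set.add PySem.Set.empty s0)
    decide (reach.length < stones.length)

-- ===== PRECONDITION & SPEC =====
-- Pre_ excludes ragged boards with a row shorter than len(board): there both Pythons raise IndexError.
def Pre_is_cut_point (board : List (List Int)) (player : Int) : Prop :=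
  ∀ row ∈ board, board.length ≤ row.length
instance (board : List (List Int)) (player : Int) : Decidable (Pre_is_cut_point board player) := by
  unfold Pre_is_cut_point; infer_instance

def pvWitness_is_cut_point : List (List Int) × Int := ([[1, 0], [0, 1]], 1)

def Spec_is_cut_point (board : List (List Int)) (player : Int) (out : Bool) : Prop := out = is_cut_point_alt board player
instance (board : List (List Int)) (player : Int) (out : Bool) : Decidable (Spec_is_cut_point board player out) := by unfold Spec_is_cut_point; infer_instance

-- ===== CLAIM (what is proved, stated in full; the proofs are below) =====
def Claim_equal_is_cut_point : Prop := ∀ (board : List (List Int)) (player : Int), Dom_is_cut_point board player → Pre_is_cut_point board player → Spec_is_cut_point board player (is_cut_point board player)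

-- ===== LEMMAS AND PROOFS =====

-- paths from a cell to a cell whose every step lands on a stone outside the avoid set V
inductive PathV (board : List (List Int)) (player : Int) (V : List (Int × Int)) :
    (Int × Int) → (Int × Int) → Prop
  | refl (c) : PathV board player V c c
  | step {a b c} : b ∈ get_neighbors a.1 a.2 (board.length : Int) →
      b ∈ stonesOf board player → b ∉ V →
      PathV board player V b c → PathV board player V a c

lemma mem_stonesOf {board : List (List Int)} {player : Int} {c : Int × Int} :
    c ∈ stonesOf board player ↔
      0 ≤ c.1 ∧ c.1 < (board.length : Int) ∧ 0 ≤ c.2 ∧ c.2 < (board.length : Int) ∧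
        cellD board c.1 c.2 = player := by
  obtain ⟨i, j⟩ := c
  simp only [stonesOf, List.mem_flatMap, List.mem_map, List.mem_filter,
    PySem.List.mem_pyRange_one, beq_iff_eq, Prod.mk.injEq]
  constructor
  · rintro ⟨i', ⟨hi1, hi2⟩, j', ⟨⟨hj1, hj2⟩, hc⟩, rfl, rfl⟩
    exact ⟨hi1, hi2, hj1, hj2, hc⟩
  · rintro ⟨hi1, hi2, hj1, hj2, hc⟩
    exact ⟨i, ⟨hi1, hi2⟩, j, ⟨⟨hj1, hj2⟩, hc⟩, rfl, rfl⟩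

lemma nodup_stonesOf (board : List (List Int)) (player : Int) :
    (stonesOf board player).Nodup := by
  unfold stonesOf
  rw [List.nodup_flatMap]
  constructor
  · intro i _
    exact (List.Nodup.filter _ (PySem.List.nodup_pyRange_one 0 board.length)).map
      (fun a b h => by simpa using h)
  · refine (PySem.List.nodup_pyRange_one 0 board.length).imp ?_
    intro i i' hne
    simp only [Function.onFun, List.disjoint_left, List.mem_map, List.mem_filter]
    rintro x ⟨j, _, rfl⟩ ⟨j', _, h⟩
    simp only [Prod.mk.injEq] at h
    exact hne h.1.symm

lemma length_stonesOf_le (board : List (List Int)) (player : Int) :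
    (stonesOf board player).length ≤ board.length * board.length := by
  unfold stonesOf
  rw [List.length_flatMap]
  calc ((PySem.List.pyRange 0 board.length 1).map (fun i =>
          (((PySem.List.pyRange 0 board.length 1).filter
            (fun j => cellD board i j == player)).map (fun j => (i, j))).length)).sum
      ≤ ((PySem.List.pyRange 0 board.length 1).map (fun _ => board.length)).sum := by
        apply List.sum_le_sum
        intro i _
        simpa using le_trans (List.length_filter_le _ _)
          (by simp [PySem.List.length_pyRange_one])
    _ ≤ board.length * board.length := by
        rw [List.map_const', List.sum_replicate, PySem.List.length_pyRange_one]
        simp [smul_eq_mul]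

lemma mem_get_neighbors {b : Int × Int} {i j size : Int} :
    b ∈ get_neighbors i j size ↔
      ∃ d ∈ hexNeighbors, b = (i + d.1, j + d.2) ∧
        0 ≤ b.1 ∧ b.1 < size ∧ 0 ≤ b.2 ∧ b.2 < size := by
  simp only [get_neighbors, List.mem_map, List.mem_filter, Bool.and_eq_true, decide_eq_true_eq]
  constructor
  · rintro ⟨d, ⟨hd, ⟨⟨h1, h2⟩, h3⟩, h4⟩, rfl⟩
    exact ⟨d, hd, rfl, h1, h2, h3, h4⟩
  · rintro ⟨d, hd, rfl, h1, h2, h3, h4⟩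
    exact ⟨d, ⟨hd, ⟨⟨h1, h2⟩, h3⟩, h4⟩, rfl⟩

lemma get_neighbors_symm {a b : Int × Int} {size : Int}
    (hb : b ∈ get_neighbors a.1 a.2 size)
    (ha1 : 0 ≤ a.1) (ha2 : a.1 < size) (ha3 : 0 ≤ a.2) (ha4 : a.2 < size) :
    a ∈ get_neighbors b.1 b.2 size := by
  obtain ⟨d, hd, hbeq, h1, h2, h3, h4⟩ := mem_get_neighbors.1 hb
  have hneg : ((-d.1, -d.2) : Int × Int) ∈ hexNeighbors := by
    fin_cases hd <;> decide
  refine mem_get_neighbors.2 ⟨(-d.1, -d.2), hneg, ?_, ha1, ha2, ha3, ha4⟩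
  obtain ⟨hx, hy⟩ : b.1 = a.1 + d.1 ∧ b.2 = a.2 + d.2 := by
    rw [hbeq]; exact ⟨rfl, rfl⟩
  have : a = (a.1, a.2) := rfl
  rw [this]
  simp only [Prod.mk.injEq]
  omega

-- enlarging the avoid set only removes paths
lemma PathV.mono {board : List (List Int)} {player : Int} {V V' : List (Int × Int)}
    (hVV : ∀ x ∈ V, x ∈ V') {s x : Int × Int}
    (h : PathV board player V' s x) : PathV board player V s x := by
  induction h with
  | refl c => exact PathV.refl c
  | step hnb hst hV _ ih => exact PathV.step hnb hst (fun hm => hV (hVV _ hm)) ih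

-- splitting a path at the last visit of c
lemma PathV.split {board : List (List Int)} {player : Int} {V : List (Int × Int)}
    {c s x : Int × Int} (h : PathV board player V s x) :
    PathV board player (c :: V) s x ∨
      (∃ b, b ∈ get_neighbors c.1 c.2 (board.length : Int) ∧ b ∈ stonesOf board player ∧
        b ∉ (c :: V) ∧ PathV board player (c :: V) b x) ∨ x = c := by
  induction h with
  | refl s => exact Or.inl (PathV.refl s)
  | @step a b x hnb hst hbV _ ih =>
    rcases ih with h' | h' | h'
    · by_cases hbc : b = c
      · subst hbc
        cases h' with
        | refl => exact Or.inr (Or.inr rfl)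
        | step hnb1 hst1 hV1 tl1 => exact Or.inr (Or.inl ⟨_, hnb1, hst1, hV1, tl1⟩)
      · exact Or.inl (PathV.step hnb hst (by simp [hbc, hbV]) h')
    · exact Or.inr (Or.inl h')
    · exact Or.inr (Or.inr h')

-- the termination measure of the DFS loop
def wgt (V : List (Int × Int)) (s : Int × Int) : Nat := if s ∈ V then 7 else 1

def dfsMu (board : List (List Int)) (player : Int)
    (V : PySem.Set (Int × Int)) (S : List (Int × Int)) : Nat :=
  (S.map (wgt V)).sum * 7 ^ ((stonesOf board player).filter (fun s => decide (s ∉ V))).length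

lemma length_get_neighbors_le (i j size : Int) : (get_neighbors i j size).length ≤ 6 := by
  unfold get_neighbors
  rw [List.length_map]
  exact le_trans (List.length_filter_le _ _) (by norm_num [hexNeighbors])

lemma mem_pushes {board : List (List Int)} {player : Int} {V' : PySem.Set (Int × Int)}
    {c p : Int × Int} :
    p ∈ (get_neighbors c.1 c.2 (board.length : Int)).filter
        (fun nb => cellD board nb.1 nb.2 == player && !(PySem.Set.contains V' nb)) ↔
      p ∈ get_neighbors c.1 c.2 (board.length : Int) ∧ p ∈ stonesOf board player ∧ p ∉ V' := by
  rw [List.mem_filter]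
  simp only [Bool.and_eq_true, beq_iff_eq, Bool.not_eq_true']
  constructor
  · rintro ⟨hnb, hcell, hV⟩
    obtain ⟨d, hd, -, h1, h2, h3, h4⟩ := mem_get_neighbors.1 hnb
    refine ⟨hnb, mem_stonesOf.2 ⟨h1, h2, h3, h4, hcell⟩, ?_⟩
    intro hmem
    rw [(PySem.Set.contains_iff V' p).2 hmem] at hV
    exact Bool.true_eq_false.mp hV
  · rintro ⟨hnb, hst, hV⟩
    refine ⟨hnb, (mem_stonesOf.1 hst).2.2.2.2, ?_⟩
    by_contra h
    exact hV ((PySem.Set.contains_iff V' p).1 (by simpa using h))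

lemma sum_wgt_of_disjoint (W : List (Int × Int)) (l : List (Int × Int))
    (h : ∀ p ∈ l, p ∉ W) : (l.map (wgt W)).sum = l.length := by
  induction l with
  | nil => simp
  | cons p t iht =>
    simp only [List.map_cons, List.sum_cons, List.length_cons]
    rw [iht (fun q hq => h q (List.mem_cons_of_mem _ hq))]
    have : wgt W p = 1 := by unfold wgt; simp [h p (List.mem_cons_self ..)]
    omega

lemma one_le_wgt (V : List (Int × Int)) (s : Int × Int) : 1 ≤ wgt V s := by
  unfold wgt; split <;> omega

lemma wgt_le_seven (V : List (Int × Int)) (s : Int × Int) : wgt V s ≤ 7 := by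
  unfold wgt; split <;> omega

lemma dfsMu_step (board : List (List Int)) (player : Int)
    {V : PySem.Set (Int × Int)} {rest : List (Int × Int)} {c : Int × Int}
    (hc : c ∈ stonesOf board player)
    {pushes : List (Int × Int)}
    (hp_len : pushes.length ≤ 6)
    (hp_notmem : ∀ p ∈ pushes, p ∉ PySem.Set.add V c) :
    dfsMu board player (PySem.Set.add V c) (rest ++ pushes) <
      dfsMu board player V (rest ++ [c]) := by
  have hpow : ∀ k : ℕ, 0 < 7 ^ k := fun k => Nat.pow_pos (by norm_num)
  by_cases hcV : c ∈ V
  · -- c already visited: stack weight drops by at least one, unvisited count unchanged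
    rw [PySem.Set.add_of_mem hcV] at *
    unfold dfsMu
    apply (Nat.mul_lt_mul_right (hpow _)).2
    simp only [List.map_append, List.sum_append]
    have h7 : wgt V c = 7 := by unfold wgt; simp [hcV]
    have := sum_wgt_of_disjoint V pushes hp_notmem
    simp only [List.map_cons, List.map_nil, List.sum_cons, List.sum_nil]
    omega
  · -- c freshly visited: unvisited count drops by one
    have hVeq : PySem.Set.add V c = V ++ [c] := PySem.Set.add_of_not_mem hcV
    unfold dfsMu
    rw [hVeq]
    -- the unvisited-stone counts
    have hfilter : (stonesOf board player).filter (fun s => decide (s ∉ V ++ [c])) =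
        ((stonesOf board player).filter (fun s => decide (s ∉ V))).filter (fun s => s != c) := by
      rw [List.filter_filter]
      apply List.filter_congr
      intro s _
      by_cases h1 : s ∈ V <;> by_cases h2 : s = c <;> simp [h1, h2, List.mem_append]
    have hnodupl : ((stonesOf board player).filter (fun s => decide (s ∉ V))).Nodup :=
      (nodup_stonesOf board player).filter _
    have hcl : c ∈ (stonesOf board player).filter (fun s => decide (s ∉ V)) :=
      List.mem_filter.2 ⟨hc, by simpa using hcV⟩
    have hlen : (((stonesOf board player).filter (fun s => decide (s ∉ V))).filter
        (fun s => s != c)).length =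
        ((stonesOf board player).filter (fun s => decide (s ∉ V))).length - 1 := by
      rw [← List.Nodup.erase_eq_filter hnodupl c, List.length_erase_of_mem hcl]
    set a := ((stonesOf board player).filter (fun s => decide (s ∉ V))).length with ha
    have ha1 : 1 ≤ a := by
      have := List.length_pos_of_mem hcl
      omega
    rw [hfilter, hlen]
    -- stack weights
    have hrestW : ((rest.map (wgt (V ++ [c]))).sum) ≤ 7 * (rest.map (wgt V)).sum := by
      rw [← List.sum_map_mul_left]
      apply List.sum_le_sum
      intro s _
      calc wgt (V ++ [c]) s ≤ 7 := wgt_le_seven _ _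
        _ ≤ 7 * wgt V s := by have := one_le_wgt V s; omega
    have hpW : ((pushes.map (wgt (V ++ [c]))).sum) = pushes.length := by
      apply sum_wgt_of_disjoint
      intro p hp
      have := hp_notmem p hp
      rwa [hVeq] at this
    have hwc : wgt V c = 1 := by unfold wgt; simp [hcV]
    simp only [List.map_append, List.sum_append, List.map_cons, List.map_nil,
      List.sum_cons, List.sum_nil]
    rw [hpW, hwc]
    have hsplit : 7 ^ a = 7 * 7 ^ (a - 1) := by
      conv_lhs => rw [show a = 1 + (a - 1) by omega]
      rw [pow_add, pow_one]
    rw [hsplit]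
    have hp1 : 0 < 7 ^ (a - 1) := hpow _
    calc ((rest.map (wgt (V ++ [c]))).sum + (pushes.length : ℕ)) * 7 ^ (a - 1)
        ≤ (7 * (rest.map (wgt V)).sum + 6) * 7 ^ (a - 1) := by
          apply Nat.mul_le_mul_right
          omega
      _ < (7 * (rest.map (wgt V)).sum + 7) * 7 ^ (a - 1) := by
          apply (Nat.mul_lt_mul_right hp1).2
          omega
      _ = ((rest.map (wgt V)).sum + (1 + 0)) * (7 * 7 ^ (a - 1)) := by ring

lemma PathV_congr {board : List (List Int)} {player : Int} {V₁ V₂ : List (Int × Int)}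
    (h : ∀ y, y ∈ V₁ ↔ y ∈ V₂) {s x : Int × Int} :
    PathV board player V₁ s x ↔ PathV board player V₂ s x :=
  ⟨PathV.mono (fun y hy => (h y).2 hy), PathV.mono (fun y hy => (h y).1 hy)⟩

-- the DFS loop computes: old visited plus everything connected to the stack through unvisited stones
lemma dfsLoop_mem (board : List (List Int)) (player : Int) :
    ∀ (fuel : Nat) (V : PySem.Set (Int × Int)) (S : List (Int × Int)),
      (∀ c ∈ S, c ∈ stonesOf board player) →
      dfsMu board player V S ≤ fuel →
      ∀ x, x ∈ dfsLoop board player (board.length : Int) fuel V S ↔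
        x ∈ V ∨ ∃ s ∈ S, PathV board player V s x := by
  intro fuel
  induction fuel with
  | zero =>
    intro V S hS hmu x
    have hSnil : S = [] := by
      cases S with
      | nil => rfl
      | cons q t =>
        exfalso
        unfold dfsMu at hmu
        have h1 : 1 ≤ ((q :: t).map (wgt V)).sum := by
          simp only [List.map_cons, List.sum_cons]
          have := one_le_wgt V q
          omega
        have h2 : 0 < 7 ^ ((stonesOf board player).filter (fun s => decide (s ∉ V))).length :=
          Nat.pow_pos (by norm_num)
        exact Nat.lt_irrefl 0 (lt_of_lt_of_le (Nat.mul_pos (by omega) h2) hmu)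
    subst hSnil
    simp [dfsLoop]
  | succ f ih =>
    intro V S hS hmu x
    rw [dfsLoop]
    cases hlast : S.getLast? with
    | none =>
      have hSnil : S = [] := List.getLast?_eq_none_iff.mp hlast
      subst hSnil
      simp
    | some c =>
      obtain ⟨rest, hSeq⟩ := List.getLast?_eq_some_iff.mp hlast
      have hdrop : S.dropLast = rest := by rw [hSeq]; simp
      have hcS : c ∈ S := by rw [hSeq]; simp
      have hc_stone := hS c hcS
      have hp_sub : ∀ p ∈ (get_neighbors c.1 c.2 (board.length : Int)).filter
          (fun nb => cellD board nb.1 nb.2 == player &&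
            !(PySem.Set.contains (PySem.Set.add V c) nb)),
          p ∈ get_neighbors c.1 c.2 (board.length : Int) ∧
            p ∈ stonesOf board player ∧ p ∉ PySem.Set.add V c :=
        fun p hp => mem_pushes.1 hp
      have hinv : ∀ q ∈ S.dropLast ++ (get_neighbors c.1 c.2 (board.length : Int)).filter
          (fun nb => cellD board nb.1 nb.2 == player &&
            !(PySem.Set.contains (PySem.Set.add V c) nb)),
          q ∈ stonesOf board player := by
        intro q hq
        rcases List.mem_append.mp hq with h | h
        · exact hS q (List.Sublist.mem h (List.dropLast_sublist _))
        · exact (hp_sub q h).2.1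
      have hmu' : dfsMu board player (PySem.Set.add V c)
          (S.dropLast ++ (get_neighbors c.1 c.2 (board.length : Int)).filter
            (fun nb => cellD board nb.1 nb.2 == player &&
              !(PySem.Set.contains (PySem.Set.add V c) nb))) ≤ f := by
        have hlt := dfsMu_step board player hc_stone
          (pushes := (get_neighbors c.1 c.2 (board.length : Int)).filter
            (fun nb => cellD board nb.1 nb.2 == player &&
              !(PySem.Set.contains (PySem.Set.add V c) nb)))
          (le_trans (List.length_filter_le _ _) (length_get_neighbors_le _ _ _))
          (fun p hp => (hp_sub p hp).2.2) (rest := S.dropLast)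
        rw [show S.dropLast ++ [c] = S from by rw [hdrop, ← hSeq]] at hlt
        omega
      rw [ih _ _ hinv hmu']
      -- set-level equality of the two closure descriptions
      by_cases hcV : c ∈ V
      · have hV'V : PySem.Set.add V c = V := PySem.Set.add_of_mem hcV
        rw [hV'V] at *
        constructor
        · rintro (hx | ⟨s, hs, hp⟩)
          · exact Or.inl hx
          · rcases List.mem_append.mp hs with h | h
            · exact Or.inr ⟨s, List.Sublist.mem h (List.dropLast_sublist _), hp⟩
            · obtain ⟨hnb, hst, hsV⟩ := mem_pushes.1 h
              exact Or.inr ⟨c, hcS, PathV.step hnb hst hsV hp⟩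
        · rintro (hx | ⟨s, hsS, hp⟩)
          · exact Or.inl hx
          · rw [hSeq] at hsS
            rcases List.mem_append.mp hsS with h | h
            · exact Or.inr ⟨s, List.mem_append_left _ (hdrop ▸ h), hp⟩
            · simp only [List.mem_singleton] at h
              subst h
              cases hp with
              | refl => exact Or.inl hcV
              | @step _ b _ hnb hst hbV tl =>
                exact Or.inr ⟨b, List.mem_append_right _ (mem_pushes.2 ⟨hnb, hst, hbV⟩), tl⟩
      · have hV'eq : PySem.Set.add V c = V ++ [c] := PySem.Set.add_of_not_mem hcV
        have hmemV' : ∀ y, y ∈ PySem.Set.add V c ↔ y ∈ c :: V := by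
          intro y; rw [hV'eq]; simp [or_comm]
        have hsubV : ∀ y, y ∈ V → y ∈ PySem.Set.add V c := by
          intro y hy; rw [hV'eq]; exact List.mem_append_left _ hy
        constructor
        · rintro (hx | ⟨s, hs, hp⟩)
          · rcases List.mem_cons.mp ((hmemV' x).1 hx) with h | h
            · rw [h]; exact Or.inr ⟨c, hcS, PathV.refl c⟩
            · exact Or.inl h
          · have hpV : PathV board player V s x := PathV.mono hsubV hp
            rcases List.mem_append.mp hs with h | h
            · exact Or.inr ⟨s, hSeq ▸ List.mem_append_left _ (hdrop ▸ h), hpV⟩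
            · obtain ⟨hnb, hst, hsV'⟩ := mem_pushes.1 h
              have hsV : s ∉ V := fun hm => hsV' (hsubV s hm)
              exact Or.inr ⟨c, hcS, PathV.step hnb hst hsV hpV⟩
        · rintro (hx | ⟨s, hsS, hp⟩)
          · exact Or.inl (hsubV x hx)
          · have hcongr : ∀ {u v : Int × Int}, PathV board player (c :: V) u v →
                PathV board player (PySem.Set.add V c) u v := by
              intro u v h
              exact (PathV_congr (fun y => (hmemV' y).symm)).1 h
            -- analyze a path that may pass through c
            have hfromc : ∀ {y : Int × Int}, PathV board player (c :: V) c y →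
                (y ∈ PySem.Set.add V c ∨ ∃ b ∈ S.dropLast ++
                  (get_neighbors c.1 c.2 (board.length : Int)).filter
                    (fun nb => cellD board nb.1 nb.2 == player &&
                      !(PySem.Set.contains (PySem.Set.add V c) nb)),
                  PathV board player (PySem.Set.add V c) b y) := by
              intro y h
              cases h with
              | refl => exact Or.inl (by rw [hV'eq]; simp)
              | @step _ b _ hnb hst hbV tl =>
                have hbV' : b ∉ PySem.Set.add V c := fun hm => hbV ((hmemV' b).1 hm)
                exact Or.inr ⟨b, List.mem_append_right _ (mem_pushes.2 ⟨hnb, hst, hbV'⟩),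
                  hcongr tl⟩
            rcases PathV.split (c := c) hp with h' | ⟨b, hnb, hst, hbV, htl⟩ | h'
            · rw [hSeq] at hsS
              rcases List.mem_append.mp hsS with h | h
              · exact Or.inr ⟨s, List.mem_append_left _ (hdrop ▸ h), hcongr h'⟩
              · simp only [List.mem_singleton] at h
                subst h
                exact hfromc h'
            · have hbV' : b ∉ PySem.Set.add V c := fun hm => hbV ((hmemV' b).1 hm)
              exact Or.inr ⟨b, List.mem_append_right _ (mem_pushes.2 ⟨hnb, hst, hbV'⟩),
                hcongr htl⟩
            · subst h'
              exact Or.inl (by rw [hV'eq]; simp)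

lemma nodup_dfsLoop (board : List (List Int)) (player : Int) (size : Int) :
    ∀ (fuel : Nat) (V : PySem.Set (Int × Int)) (S : List (Int × Int)),
      V.Nodup → (dfsLoop board player size fuel V S).Nodup := by
  intro fuel
  induction fuel with
  | zero => intro V S hV; simpa [dfsLoop] using hV
  | succ f ih =>
    intro V S hV
    rw [dfsLoop]
    cases hS : S.getLast? with
    | none => simpa using hV
    | some c => exact ih _ _ (PySem.Set.nodup_add V c hV)

-- ---- B side ----

lemma propagate_step_cases (size : Int)
    (r : PySem.Set (Int × Int)) (s : Int × Int) :
    (if !(PySem.Set.contains r s) &&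
        (get_neighbors s.1 s.2 size).any (fun nb => PySem.Set.contains r nb)
      then PySem.Set.add r s else r) = r ∨
    (if !(PySem.Set.contains r s) &&
        (get_neighbors s.1 s.2 size).any (fun nb => PySem.Set.contains r nb)
      then PySem.Set.add r s else r) = PySem.Set.add r s := by
  split
  · exact Or.inr rfl
  · exact Or.inl rfl

lemma propagate_prefix (size : Int) :
    ∀ (l : List (Int × Int)) (r : PySem.Set (Int × Int)),
      ∃ t, l.foldl (fun r s =>
        if !(PySem.Set.contains r s) &&
            (get_neighbors s.1 s.2 size).any (fun nb => PySem.Set.contains r nb)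
        then PySem.Set.add r s else r) r = r ++ t := by
  intro l
  induction l with
  | nil => intro r; exact ⟨[], by simp⟩
  | cons q tl ih =>
    intro r
    simp only [List.foldl_cons]
    rcases propagate_step_cases size r q with h | h <;> rw [h]
    · exact ih r
    · by_cases hq : q ∈ r
      · rw [PySem.Set.add_of_mem hq]; exact ih r
      · rw [PySem.Set.add_of_not_mem hq]
        obtain ⟨t, ht⟩ := ih (r ++ [q])
        exact ⟨[q] ++ t, by rw [ht, List.append_assoc]⟩

lemma mem_foldl_prop_of_mem (size : Int)
    {l : List (Int × Int)} {r : PySem.Set (Int × Int)} {x : Int × Int} (hx : x ∈ r) :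
    x ∈ l.foldl (fun r s =>
        if !(PySem.Set.contains r s) &&
            (get_neighbors s.1 s.2 size).any (fun nb => PySem.Set.contains r nb)
        then PySem.Set.add r s else r) r := by
  obtain ⟨t, ht⟩ := propagate_prefix size l r
  rw [ht]
  exact List.mem_append_left _ hx

lemma nodup_foldl_prop (size : Int) :
    ∀ (l : List (Int × Int)) (r : PySem.Set (Int × Int)), r.Nodup →
      (l.foldl (fun r s =>
        if !(PySem.Set.contains r s) &&
            (get_neighbors s.1 s.2 size).any (fun nb => PySem.Set.contains r nb)
        then PySem.Set.add r s else r) r).Nodup := by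
  intro l
  induction l with
  | nil => intro r hr; simpa using hr
  | cons q tl ih =>
    intro r hr
    simp only [List.foldl_cons]
    rcases propagate_step_cases size r q with h | h <;> rw [h]
    · exact ih r hr
    · exact ih _ (PySem.Set.nodup_add r q hr)

lemma mem_foldl_prop_cases (size : Int) :
    ∀ (l : List (Int × Int)) (r : PySem.Set (Int × Int)) (x : Int × Int),
      x ∈ l.foldl (fun r s =>
        if !(PySem.Set.contains r s) &&
            (get_neighbors s.1 s.2 size).any (fun nb => PySem.Set.contains r nb)
        then PySem.Set.add r s else r) r → x ∈ r ∨ x ∈ l := by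
  intro l
  induction l with
  | nil => intro r x hx; exact Or.inl (by simpa using hx)
  | cons q tl ih =>
    intro r x hx
    simp only [List.foldl_cons] at hx
    rcases propagate_step_cases size r q with h | h <;> rw [h] at hx
    · rcases ih r x hx with h' | h'
      · exact Or.inl h'
      · exact Or.inr (List.mem_cons_of_mem _ h')
    · rcases ih _ x hx with h' | h'
      · rcases (PySem.Set.mem_add r q x).1 h' with h'' | h''
        · exact Or.inl h''
        · exact Or.inr (h'' ▸ List.mem_cons_self ..)
      · exact Or.inr (List.mem_cons_of_mem _ h')

lemma PathV.snoc {board : List (List Int)} {player : Int} {V : List (Int × Int)}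
    {a b c : Int × Int} (h : PathV board player V a b)
    (hnb : c ∈ get_neighbors b.1 b.2 (board.length : Int))
    (hst : c ∈ stonesOf board player) (hcV : c ∉ V) :
    PathV board player V a c := by
  induction h with
  | refl d => exact PathV.step hnb hst hcV (PathV.refl c)
  | step hnb' hst' hV' _ ih => exact PathV.step hnb' hst' hV' (ih hnb)

lemma foldl_prop_sound (board : List (List Int)) (player : Int) {s0 : Int × Int}
    (hs0 : s0 ∈ stonesOf board player) :
    ∀ (l : List (Int × Int)), (∀ q ∈ l, q ∈ stonesOf board player) →
      ∀ (r : PySem.Set (Int × Int)),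
      (∀ x ∈ r, PathV board player [] s0 x) →
      ∀ x ∈ l.foldl (fun r s =>
        if !(PySem.Set.contains r s) &&
            (get_neighbors s.1 s.2 (board.length : Int)).any
              (fun nb => PySem.Set.contains r nb)
        then PySem.Set.add r s else r) r,
        PathV board player [] s0 x := by
  intro l
  induction l with
  | nil => intro _ r hr x hx; exact hr x (by simpa using hx)
  | cons q tl ih =>
    intro hl r hr x hx
    simp only [List.foldl_cons] at hx
    have hq_stone : q ∈ stonesOf board player := hl q (List.mem_cons_self ..)
    have htl : ∀ p ∈ tl, p ∈ stonesOf board player :=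
      fun p hp => hl p (List.mem_cons_of_mem _ hp)
    rcases propagate_step_cases (board.length : Int) r q with h | h
    · rw [h] at hx; exact ih htl r hr x hx
    · rw [h] at hx
      refine ih htl _ ?_ x hx
      intro y hy
      rcases (PySem.Set.mem_add r q y).1 hy with h' | h'
      · exact hr y h'
      · subst h'
        by_cases hq : y ∈ r
        · exact hr y hq
        · -- y was genuinely added, so the if-condition held: some neighbor of y is in r
          have hcond : (!(PySem.Set.contains r y) &&
              (get_neighbors y.1 y.2 (board.length : Int)).any
                (fun nb => PySem.Set.contains r nb)) = true := by
            by_contra hcontra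
            rw [if_neg (by simpa using hcontra)] at h
            have hmem : y ∈ PySem.Set.add r y := (PySem.Set.mem_add r y y).2 (Or.inr rfl)
            rw [← h] at hmem
            exact hq hmem
          rw [Bool.and_eq_true] at hcond
          obtain ⟨nb, hnbmem, hnbr⟩ := List.any_eq_true.1 hcond.2
          have hnbR : nb ∈ r := (PySem.Set.contains_iff r nb).1 hnbr
          have hPnb : PathV board player [] s0 nb := hr nb hnbR
          have hq4 := mem_stonesOf.1 hq_stone
          have hsym : y ∈ get_neighbors nb.1 nb.2 (board.length : Int) :=
            get_neighbors_symm hnbmem hq4.1 hq4.2.1 hq4.2.2.1 hq4.2.2.2.1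
          exact PathV.snoc hPnb hsym hq_stone (by simp)

lemma foldl_prop_closed (size : Int) :
    ∀ (l : List (Int × Int)) (r : PySem.Set (Int × Int)) (s : Int × Int),
      s ∈ l → (∃ nb ∈ get_neighbors s.1 s.2 size, nb ∈ r) →
      s ∈ l.foldl (fun r s =>
        if !(PySem.Set.contains r s) &&
            (get_neighbors s.1 s.2 size).any (fun nb => PySem.Set.contains r nb)
        then PySem.Set.add r s else r) r := by
  intro l
  induction l with
  | nil => intro r s hs; exact absurd hs (List.not_mem_nil)
  | cons q tl ih =>
    intro r s hs hnb
    simp only [List.foldl_cons]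
    rcases List.mem_cons.mp hs with h | h
    · subst h
      have hstep : s ∈ (if !(PySem.Set.contains r s) &&
          (get_neighbors s.1 s.2 size).any (fun nb => PySem.Set.contains r nb)
        then PySem.Set.add r s else r) := by
        by_cases hc : s ∈ r
        · rcases propagate_step_cases size r s with h' | h' <;> rw [h']
          · exact hc
          · exact (PySem.Set.mem_add r s s).2 (Or.inl hc)
        · have hany : (get_neighbors s.1 s.2 size).any
              (fun nb => PySem.Set.contains r nb) = true := by
            obtain ⟨nb, h1, h2⟩ := hnb
            exact List.any_eq_true.2 ⟨nb, h1, (PySem.Set.contains_iff r nb).2 h2⟩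
          have hcf : PySem.Set.contains r s = false := by
            cases hcc : PySem.Set.contains r s
            · rfl
            · exact absurd ((PySem.Set.contains_iff r s).1 hcc) hc
          rw [if_pos (by rw [hcf, hany]; rfl)]
          exact (PySem.Set.mem_add r s s).2 (Or.inr rfl)
      exact mem_foldl_prop_of_mem size hstep
    · refine ih _ s h ?_
      obtain ⟨nb, h1, h2⟩ := hnb
      refine ⟨nb, h1, ?_⟩
      rcases propagate_step_cases size r q with h' | h' <;> rw [h']
      · exact h2
      · exact (PySem.Set.mem_add r q nb).2 (Or.inl h2)

-- the iterated propagation of B's port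
def iterP (board : List (List Int)) (player : Int) (s0 : Int × Int) (k : Nat) :
    PySem.Set (Int × Int) :=
  (List.range k).foldl
    (fun r _ => propagate board player (board.length : Int) (stonesOf board player) r)
    (PySem.Set.add PySem.Set.empty s0)

lemma iterP_zero (board : List (List Int)) (player : Int) (s0 : Int × Int) :
    iterP board player s0 0 = [s0] := by
  simp [iterP, PySem.Set.add, PySem.Set.empty]

lemma iterP_succ (board : List (List Int)) (player : Int) (s0 : Int × Int) (k : Nat) :
    iterP board player s0 (k + 1) =
      propagate board player (board.length : Int) (stonesOf board player)
        (iterP board player s0 k) := by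
  unfold iterP
  rw [List.range_succ, List.foldl_append]
  rfl

lemma iterP_nodup (board : List (List Int)) (player : Int) (s0 : Int × Int) (k : Nat) :
    (iterP board player s0 k).Nodup := by
  induction k with
  | zero => rw [iterP_zero]; simp
  | succ k ih =>
    rw [iterP_succ]
    exact nodup_foldl_prop _ _ _ ih

lemma iterP_subset (board : List (List Int)) (player : Int) {s0 : Int × Int}
    (hs0 : s0 ∈ stonesOf board player) (k : Nat) :
    ∀ x ∈ iterP board player s0 k, x ∈ stonesOf board player := by
  induction k with
  | zero => rw [iterP_zero]; intro x hx; simp at hx; exact hx ▸ hs0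
  | succ k ih =>
    rw [iterP_succ]
    intro x hx
    rcases mem_foldl_prop_cases _ _ _ x hx with h | h
    · exact ih x h
    · exact h

lemma iterP_mem_s0 (board : List (List Int)) (player : Int) (s0 : Int × Int) (k : Nat) :
    s0 ∈ iterP board player s0 k := by
  induction k with
  | zero => rw [iterP_zero]; exact List.mem_singleton_self _
  | succ k ih =>
    rw [iterP_succ]
    exact mem_foldl_prop_of_mem _ ih

lemma iterP_fix_or_len (board : List (List Int)) (player : Int) (s0 : Int × Int) :
    ∀ k, propagate board player (board.length : Int) (stonesOf board player)
        (iterP board player s0 k) = iterP board player s0 k ∨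
      k + 1 ≤ (iterP board player s0 k).length := by
  intro k
  induction k with
  | zero => right; rw [iterP_zero]; simp
  | succ k ih =>
    by_cases hf : propagate board player (board.length : Int) (stonesOf board player)
        (iterP board player s0 k) = iterP board player s0 k
    · left
      rw [iterP_succ, hf, hf]
    · rcases ih with h | h
      · exact absurd h hf
      · right
        rw [iterP_succ]
        obtain ⟨t, ht⟩ := propagate_prefix (board.length : Int)
          (stonesOf board player) (iterP board player s0 k)
        have ht' : propagate board player (board.length : Int) (stonesOf board player)
            (iterP board player s0 k) = iterP board player s0 k ++ t := ht
        have hne : t ≠ [] := by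
          intro h0
          apply hf
          rw [ht', h0, List.append_nil]
        show (propagate board player (board.length : Int) (stonesOf board player)
          (iterP board player s0 k)).length ≥ k + 2
        rw [ht', List.length_append]
        have := List.length_pos_of_ne_nil hne
        omega

lemma iterP_fix (board : List (List Int)) (player : Int) {s0 : Int × Int}
    (hs0 : s0 ∈ stonesOf board player) :
    propagate board player (board.length : Int) (stonesOf board player)
      (iterP board player s0 (stonesOf board player).length) =
    iterP board player s0 (stonesOf board player).length := by
  rcases iterP_fix_or_len board player s0 (stonesOf board player).length with h | h
  · exact h
  · exfalso
    have hle : (iterP board player s0 (stonesOf board player).length).length ≤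
        (stonesOf board player).length :=
      ((List.subperm_of_subset (iterP_nodup board player s0 _)
        (fun x hx => iterP_subset board player hs0 _ x hx))).length_le
    omega

lemma alt_reach_mem (board : List (List Int)) (player : Int) (s0 : Int × Int)
    (hs0 : s0 ∈ stonesOf board player) :
    ∀ x, x ∈ iterP board player s0 (stonesOf board player).length ↔
      PathV board player [] s0 x := by
  intro x
  constructor
  · -- soundness, by induction along the iterations
    have : ∀ k, ∀ y ∈ iterP board player s0 k, PathV board player [] s0 y := by
      intro k
      induction k with
      | zero =>
        rw [iterP_zero]
        intro y hy
        simp at hy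
        subst hy
        exact PathV.refl _
      | succ k ih =>
        rw [iterP_succ]
        exact foldl_prop_sound board player hs0 (stonesOf board player)
          (fun q hq => hq) _ ih
    exact this _ x
  · -- completeness: the fixpoint is closed under adjacency
    intro hpath
    have hfix := iterP_fix board player hs0
    have hclosed : ∀ b, b ∈ stonesOf board player →
        (∃ nb ∈ get_neighbors b.1 b.2 (board.length : Int),
          nb ∈ iterP board player s0 (stonesOf board player).length) →
        b ∈ iterP board player s0 (stonesOf board player).length := by
      intro b hb hnb
      have := foldl_prop_closed (board.length : Int) (stonesOf board player)
        (iterP board player s0 (stonesOf board player).length) b hb hnb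
      rwa [show (stonesOf board player).foldl _ _ =
        propagate board player (board.length : Int) (stonesOf board player)
          (iterP board player s0 (stonesOf board player).length) from rfl, hfix] at this
    clear hfix
    have hanch : ∀ a y, PathV board player [] a y →
        a ∈ iterP board player s0 (stonesOf board player).length →
        a ∈ stonesOf board player →
        y ∈ iterP board player s0 (stonesOf board player).length := by
      intro a y h
      induction h with
      | refl c => intro hc _; exact hc
      | @step a' b' c' hnb hst hV tl ih =>
        intro ha hastone
        have h4 := mem_stonesOf.1 hastone
        have hsym : a' ∈ get_neighbors b'.1 b'.2 (board.length : Int) :=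
          get_neighbors_symm hnb h4.1 h4.2.1 h4.2.2.1 h4.2.2.2.1
        have hb : b' ∈ iterP board player s0 (stonesOf board player).length :=
          hclosed b' hst ⟨a', hsym, ha⟩
        exact ih hb hst
    exact hanch s0 x hpath (iterP_mem_s0 board player s0 _) hs0

-- ===== VERDICT (by name: the statement is the Claim_ definition above) =====
theorem is_cut_point_spec : Claim_equal_is_cut_point := by
  unfold Claim_equal_is_cut_point
  intro board player _ _
  unfold Spec_is_cut_point is_cut_point is_cut_point_alt
  cases hs : stonesOf board player with
  | nil => simp
  | cons s0 rest =>
    simp only [hs]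

    have hs0 : s0 ∈ stonesOf board player := by rw [hs]; exact List.mem_cons_self ..
    have hmuA : dfsMu board player PySem.Set.empty [s0] ≤
        7 ^ (board.length * board.length) := by
      have heq : dfsMu board player PySem.Set.empty [s0] =
          7 ^ (stonesOf board player).length := by
        unfold dfsMu wgt
        simp [PySem.Set.empty]
      rw [heq]
      exact Nat.pow_le_pow_right (by norm_num) (length_stonesOf_le board player)
    have hmemA : ∀ x, x ∈ dfsLoop board player (board.length : Int)
        (7 ^ (board.length * board.length)) PySem.Set.empty [s0] ↔
        PathV board player [] s0 x := by
      intro x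
      rw [dfsLoop_mem board player _ PySem.Set.empty [s0]
        (by intro c hc; rw [List.mem_singleton] at hc; subst hc; exact hs0) hmuA]
      simp [PySem.Set.empty]
    have hB := alt_reach_mem board player s0 hs0
    unfold iterP at hB
    rw [hs] at hB
    have hnodA : (dfsLoop board player (board.length : Int)
        (7 ^ (board.length * board.length)) PySem.Set.empty [s0]).Nodup :=
      nodup_dfsLoop board player _ _ _ _ (by simp [PySem.Set.empty])
    have hnodB := iterP_nodup board player s0 (stonesOf board player).length
    unfold iterP at hnodB
    rw [hs] at hnodB
    have hperm := (List.perm_ext_iff_of_nodup hnodA hnodB).mpr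
      (fun a => (hmemA a).trans ((hB a).symm))
    rw [hperm.length_eq]
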